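-- pv_equiv track=rewrite | github.com/GuyArieli17/Search_Engine | main.py | bind_tokens_by_caps
-- ===== SOURCE A (Python) =====
-- def bind_tokens_by_caps(list_tokens):
--     return_list = []
--     prev_string = ""
--     for token in list_tokens:
--         if token[0].isupper():
--             if prev_string == "":
--                 prev_string = token
--             else:
--                 prev_string += ' ' + token
--         else:
--             if prev_string != '':
--                 return_list.append(prev_string)
--             return_list.append(token)
--             prev_string = ''
--     if prev_string != '':
--         return_list.append(prev_string)
--     return return_list
-- ===== SOURCE B (Python) =====
-- def bind_tokens_by_caps(list_tokens):
--     result = []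
--     i, n = 0, len(list_tokens)
--     while i < n:
--         cap = list_tokens[i][0].isupper()
--         j = i + 1
--         while j < n and list_tokens[j][0].isupper() == cap:
--             j += 1
--         group = list_tokens[i:j]
--         if cap:
--             result.append(' '.join(group))
--         else:
--             result.extend(group)
--         i = j
--     return result
-- ===== Notes on version B (the rewrite author's own statement) =====
-- stated objective: alternative
-- what changed: Replaces the stateful single pass with prev_string accumulator and sentinel/flush logic by a group-then-shape pass: find each maximal run of same-capitalization tokens, then join capitalized runs with spaces and extend with non-capitalized runs as-is.
import Mathlib
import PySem

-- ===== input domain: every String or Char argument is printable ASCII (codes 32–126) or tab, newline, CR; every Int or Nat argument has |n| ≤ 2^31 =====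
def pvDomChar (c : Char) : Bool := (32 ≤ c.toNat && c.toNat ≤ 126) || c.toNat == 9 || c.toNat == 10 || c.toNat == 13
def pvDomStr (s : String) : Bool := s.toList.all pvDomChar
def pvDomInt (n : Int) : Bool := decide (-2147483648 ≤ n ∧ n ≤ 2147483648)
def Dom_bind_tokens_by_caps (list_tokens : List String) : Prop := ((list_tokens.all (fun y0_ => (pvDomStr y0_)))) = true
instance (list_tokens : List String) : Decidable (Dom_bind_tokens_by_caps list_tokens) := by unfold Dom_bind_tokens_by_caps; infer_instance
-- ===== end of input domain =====

-- B replaces A's stateful prev_string accumulator/flush pass by a group-then-shape pass over maximal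
-- same-capitalization runs (alternative decomposition, same cost).

-- token[0].isupper(): Pre_ excludes "" (Python raises IndexError there), so headD's default is never read
def capKey (t : String) : Bool := PySem.Chars.isupper (t.toList.headD ' ')

-- prev_string + ' ' + token, written on the List Char side (exact for string concatenation)
def joinSp (a b : String) : String := String.ofList (a.toList ++ ' ' :: b.toList)

-- ===== PORT A =====
-- A's for-loop as structural recursion over the tokens; state = (return_list, prev_string)
def goA : List String → List String → String → List String
  | [], rl, prev => if prev ≠ "" then rl ++ [prev] else rl
  | t :: rest, rl, prev =>
    if capKey t then
      if prev == "" then goA rest rl t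
      else goA rest rl (joinSp prev t)
    else
      if prev ≠ "" then goA rest (rl ++ [prev, t]) ""
      else goA rest (rl ++ [t]) ""
def bind_tokens_by_caps (list_tokens : List String) : List String :=
  goA list_tokens [] ""

-- ===== PORT B =====
-- B's outer while-loop: take the maximal run of tokens keyed by the head's capitalization, shape it, recurse
def goB (l : List String) : List String :=
  match l with
  | [] => []
  | t :: rest =>
    let cap := capKey t
    let run := t :: rest.takeWhile (fun x => capKey x == cap)
    let rem := rest.dropWhile (fun x => capKey x == cap)
    if cap then PySem.Str.join " " run :: goB rem else run ++ goB rem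
termination_by l.length
decreasing_by
  all_goals
    have := List.length_dropWhile_le (fun x => capKey x == capKey t) rest
    simp only [List.length_cons]
    omega


def bind_tokens_by_caps_alt (list_tokens : List String) : List String :=
  goB list_tokens

-- ===== PRECONDITION & SPEC =====
-- Pre_ excludes lists containing the empty string: there token[0] raises IndexError in A (and in B).
def Pre_bind_tokens_by_caps (list_tokens : List String) : Prop := "" ∉ list_tokens
instance (list_tokens : List String) : Decidable (Pre_bind_tokens_by_caps list_tokens) := by unfold Pre_bind_tokens_by_caps; infer_instance

def pvWitness_bind_tokens_by_caps : List String := ["Hello", "World", "is", "Nice"]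

def Spec_bind_tokens_by_caps (list_tokens : List String) (out : List String) : Prop := out = bind_tokens_by_caps_alt list_tokens
instance (list_tokens : List String) (out : List String) : Decidable (Spec_bind_tokens_by_caps list_tokens out) := by unfold Spec_bind_tokens_by_caps; infer_instance

-- ===== CLAIM (what is proved, stated in full; the proofs are below) =====
def Claim_equal_bind_tokens_by_caps : Prop := ∀ (list_tokens : List String), Dom_bind_tokens_by_caps list_tokens → Pre_bind_tokens_by_caps list_tokens → Spec_bind_tokens_by_caps list_tokens (bind_tokens_by_caps list_tokens)

-- ===== LEMMAS AND PROOFS =====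

theorem joinSp_ne_empty (a b : String) : joinSp a b ≠ "" := by
  intro h
  have := congrArg String.toList h
  simp [joinSp] at this
theorem capKey_ne_empty {t : String} (h : capKey t = true) : t ≠ "" := by
  intro he; subst he; simp [capKey] at h; exact absurd h (by decide)
theorem join_shift (t x : String) (xs : List String) :
    PySem.Str.join " " (joinSp t x :: xs) = PySem.Str.join " " (t :: x :: xs) := by
  cases xs <;> simp [PySem.Str.join, PySem.Chars.join, joinSp, List.intercalate]
theorem join_foldl (xs : List String) : ∀ (t : String),
    PySem.Str.join " " (t :: xs) = xs.foldl joinSp t := by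
  induction xs with
  | nil => intro t; simp [PySem.Str.join, PySem.Chars.join, List.intercalate]
  | cons x rest ih =>
    intro t
    rw [List.foldl_cons, ← ih (joinSp t x), join_shift]

theorem goA_acc (ts : List String) : ∀ (rl : List String) (prev : String),
    goA ts rl prev = rl ++ goA ts [] prev := by
  induction ts with
  | nil => intro rl prev; by_cases h : prev = "" <;> simp [goA, h]
  | cons t rest ih =>
    intro rl prev
    by_cases hc : capKey t
    · by_cases hp : prev = ""
      · simp [goA, hc, hp]; exact ih rl t
      · simp [goA, hc, hp]; exact ih rl (joinSp prev t)
    · by_cases hp : prev = ""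
      · simp [goA, hc, hp]
        rw [ih (rl ++ [t]) "", ih [t] ""]; simp
      · simp [goA, hc, hp]
        rw [ih (rl ++ [prev, t]) "", ih [prev, t] ""]; simp

theorem goB_noncap (rest : List String) :
    rest.takeWhile (fun x => !capKey x) ++
      goB (rest.dropWhile (fun x => !capKey x)) = goB rest := by
  cases rest with
  | nil => simp [goB]
  | cons r rs =>
    by_cases h : capKey r
    · simp [h]
    · have hf : capKey r = false := by revert h; cases capKey r <;> simp
      conv_rhs => rw [goB]
      simp [hf]

theorem main_lemma : ∀ (n : Nat) (ts : List String), ts.length ≤ n →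
    (goA ts [] "" = goB ts) ∧
    (∀ prev, prev ≠ "" →
      goA ts [] prev = (ts.takeWhile capKey).foldl joinSp prev :: goB (ts.dropWhile capKey)) := by
  intro n
  induction n with
  | zero =>
    intro ts h
    have : ts = [] := List.eq_nil_of_length_eq_zero (Nat.le_zero.mp h)
    subst this
    exact ⟨by simp [goA, goB], fun prev hp => by simp [goA, goB, hp]⟩
  | succ n ih =>
    intro ts h
    cases ts with
    | nil => exact ⟨by simp [goA, goB], fun prev hp => by simp [goA, goB, hp]⟩
    | cons t rest =>
      have hr : rest.length ≤ n := by simpa using Nat.lt_succ_iff.mp (Nat.lt_of_lt_of_le (by simp) h)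
      by_cases hc : capKey t
      · have hpred : (fun x => capKey x == capKey t) = capKey := by
          funext x; simp [hc]
        have hB : goB (t :: rest) =
            PySem.Str.join " " (t :: rest.takeWhile capKey) :: goB (rest.dropWhile capKey) := by
          rw [goB, hpred]
          simp [hc]
        constructor
        · show goA (t :: rest) [] "" = goB (t :: rest)
          have ht : t ≠ "" := capKey_ne_empty hc
          rw [hB, join_foldl]
          simp [goA, hc]
          exact (ih rest hr).2 t ht
        · intro prev hp
          simp [goA, hc, hp]
          rw [(ih rest hr).2 (joinSp prev t) (joinSp_ne_empty prev t)]
      · have hf : capKey t = false := by revert hc; cases capKey t <;> simp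
        have hB : goB (t :: rest) = t :: goB rest := by
          conv_lhs => rw [goB]
          simp [hf]
          exact goB_noncap rest
        constructor
        · show goA (t :: rest) [] "" = goB (t :: rest)
          simp [goA, hf]
          rw [goA_acc, (ih rest hr).1, hB]
          simp
        · intro prev hp
          simp [goA, hf, hp]
          rw [goA_acc, (ih rest hr).1]
          simp [hB]

-- ===== VERDICT (by name: the statement is the Claim_ definition above) =====
theorem bind_tokens_by_caps_spec : Claim_equal_bind_tokens_by_caps := by
  intro ts _ _
  show bind_tokens_by_caps ts = bind_tokens_by_caps_alt ts
  exact (main_lemma ts.length ts (le_refl _)).1
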